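-- pv_equiv track=rewrite | github.com/MoiColl/TheGenerationTimeProject | MutationAccumulation/derived_alleles.py | inXDE
-- ===== SOURCE A (Python) =====
-- def inXDE(pos):
--     '''
--     Input:
--         - pos   : locus genomic position
--     Output:
--         - boolean : If the locus is in X chromosome DEgenerate region (XDE), returns True.
--     '''
--     XDE = [[ 2649374,  2917723], [ 6616339,  7472224],
--            [14071703, 16095786], [16170060, 17986473],
--            [18016663, 18271273], [18537443, 19567356],
--            [21031901, 22216158], [22512750, 23497632]]
--
--     for reg in XDE:
--         start, end = reg
--         if start <= pos and end > pos:
--             return True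
--     return False
-- ===== SOURCE B (Python) =====
-- def inXDE(pos):
--     '''
--     Input:
--         - pos   : locus genomic position
--     Output:
--         - boolean : If the locus is in X chromosome DEgenerate region (XDE), returns True.
--     '''
--     flat = [ 2649374,  2917723,  6616339,  7472224,
--             14071703, 16095786, 16170060, 17986473,
--             18016663, 18271273, 18537443, 19567356,
--             21031901, 22216158, 22512750, 23497632]
--     # binary search: number of boundaries <= pos; odd parity => inside a region
--     lo, hi = 0, len(flat)
--     while lo < hi:
--         mid = (lo + hi) // 2
--         if flat[mid] <= pos:
--             lo = mid + 1
--         else: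
--             hi = mid
--     return lo % 2 == 1
-- ===== Notes on version B (the rewrite author's own statement) =====
-- stated objective: faster
-- what changed: Replaces the linear scan over the interval pairs with a hand-written binary search (bisect_right) over a flat sorted boundary array, returning odd-parity of the insertion index.
import Mathlib
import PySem

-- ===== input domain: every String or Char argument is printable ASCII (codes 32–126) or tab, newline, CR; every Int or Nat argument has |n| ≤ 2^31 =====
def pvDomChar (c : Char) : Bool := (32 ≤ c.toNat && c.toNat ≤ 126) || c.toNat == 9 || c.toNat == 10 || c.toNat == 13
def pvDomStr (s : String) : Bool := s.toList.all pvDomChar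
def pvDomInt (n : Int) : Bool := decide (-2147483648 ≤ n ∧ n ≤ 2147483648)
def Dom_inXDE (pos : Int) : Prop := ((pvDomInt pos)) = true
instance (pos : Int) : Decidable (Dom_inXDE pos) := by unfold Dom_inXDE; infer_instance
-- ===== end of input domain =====

-- B replaces A's linear scan of interval pairs by a binary search over a flat sorted boundary array (odd insertion index = inside); equal return value proved for all pos.

-- ===== PORT A =====
-- the for-loop over XDE becomes structural recursion over the same list
def inXDE_go (pos : Int) : List (Int × Int) → Bool
  | [] => false
  | (s, e) :: rest => if s ≤ pos && e > pos then true else inXDE_go pos rest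

def inXDE (pos : Int) : Bool :=
  let XDE : List (Int × Int) :=
    [(2649374, 2917723), (6616339, 7472224),
     (14071703, 16095786), (16170060, 17986473),
     (18016663, 18271273), (18537443, 19567356),
     (21031901, 22216158), (22512750, 23497632)]
  inXDE_go pos XDE

-- ===== PORT B =====
def pvFlat : List Int :=
  [2649374, 2917723, 6616339, 7472224,
   14071703, 16095786, 16170060, 17986473,
   18016663, 18271273, 18537443, 19567356,
   21031901, 22216158, 22512750, 23497632]

-- Source B's while loop, with fuel = 16 ≥ number of iterations (loop halves hi-lo ≤ 16 each step)
def pvBisect (pos : Int) : Nat → Nat → Nat → Nat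
  | 0, lo, _ => lo
  | fuel + 1, lo, hi =>
    if lo < hi then
      let mid := (lo + hi) / 2
      if pvFlat.getD mid 0 ≤ pos then pvBisect pos fuel (mid + 1) hi
      else pvBisect pos fuel lo mid
    else lo

def inXDE_alt (pos : Int) : Bool := pvBisect pos 16 0 16 % 2 == 1

-- ===== PRECONDITION & SPEC =====
def Spec_inXDE (pos : Int) (out : Bool) : Prop := out = inXDE_alt pos
instance (pos : Int) (out : Bool) : Decidable (Spec_inXDE pos out) := by unfold Spec_inXDE; infer_instance

-- ===== CLAIM (what is proved, stated in full; the proofs are below) =====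
def Claim_equal_inXDE : Prop := ∀ (pos : Int), Dom_inXDE pos → Spec_inXDE pos (inXDE pos)

-- ===== LEMMAS AND PROOFS =====

-- ===== VERDICT (by name: the statement is the Claim_ definition above) =====
set_option maxHeartbeats 2000000 in
theorem inXDE_spec : Claim_equal_inXDE := by
  intro pos _
  unfold Spec_inXDE
  simp [inXDE, inXDE_alt, inXDE_go, pvBisect, pvFlat]
  split_ifs <;> simp_all <;> omega
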